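-- pv_equiv track=rewrite | github.com/Jooh34/algorithm | programmers/138475.py | solution
-- ===== SOURCE A (Python) =====
-- def solution(e, starts):
--     mem = [0]*(e+1)
--     i=1
--     while True:
--         ni = i*i
--         if ni > e: break
--
--         mem[ni] -= 1
--         while ni <= e:
--             mem[ni] += 2
--             ni += i
--
--         i+=1
--
--     dp = [0]*(e+1)
--
--     mx = mem[e]
--     dp[e] = e
--     for i in range(e-1,-1,-1):
--         if mx <= mem[i]:
--             mx = mem[i]
--             dp[i] = i
--         else:
--             dp[i] = dp[i+1]
--
--     return [dp[s] for s in starts]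
-- ===== SOURCE B (Python) =====
-- def solution(e, starts):
--     # classic full divisor-count sieve (one +1 per multiple of each i)
--     mem = [0]*(e+1)
--     for i in range(1, e+1):
--         for j in range(i, e+1, i):
--             mem[j] += 1
--
--     # suffix argmax built back-to-front as a growing list, then reversed:
--     # dp[-1] is always the smallest index achieving the max of the suffix seen so far
--     dp = [e]
--     for i in range(e-1, -1, -1):
--         dp.append(i if mem[i] >= mem[dp[-1]] else dp[-1])
--     dp.reverse()
--
--     return [dp[s] for s in starts]
-- ===== Notes on version B (the rewrite author's own statement) =====
-- stated objective: alternative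
-- what changed: The sqrt(e)-bounded pair-counting sieve (+2 per multiple from i*i, -1 at the square) is replaced by the classic full divisor-count sieve (+1 at every multiple of every i in 1..e), and the suffix dp is no longer a preallocated array updated with a running max: B grows a plain list back-to-front whose last element is the current suffix argmax and reverses it once at the end.
import Mathlib
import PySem

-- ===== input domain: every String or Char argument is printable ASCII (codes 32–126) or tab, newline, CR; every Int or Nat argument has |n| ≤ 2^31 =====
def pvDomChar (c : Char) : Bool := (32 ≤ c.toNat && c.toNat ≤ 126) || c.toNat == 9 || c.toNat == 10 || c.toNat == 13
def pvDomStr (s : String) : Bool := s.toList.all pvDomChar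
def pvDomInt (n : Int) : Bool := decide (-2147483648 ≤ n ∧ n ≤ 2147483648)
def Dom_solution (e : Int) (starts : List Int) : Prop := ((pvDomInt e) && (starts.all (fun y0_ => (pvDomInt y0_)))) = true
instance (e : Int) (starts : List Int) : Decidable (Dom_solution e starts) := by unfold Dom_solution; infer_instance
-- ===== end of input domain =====

-- B replaces A's sqrt(e)-bounded pair-counting sieve (+2 per multiple from i*i, -1 at
-- the square) with the classic full divisor-count sieve (+1 at every multiple of every
-- i in 1..e), and replaces A's preallocated dp array with a running max by a list grown
-- back-to-front whose last element is the current suffix argmax, reversed once at the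
-- end (objective: alternative).

-- ===== PORT A =====
-- Python's list is an array: A keeps 'mem'/'dp' as Array Int.
-- pvGet/pvSet are 'mem[j]' / 'mem[j] = v': exact for the nonnegative in-range
-- indices these loops use (all writes and reads below are at 0 ≤ j ≤ e < len);
-- the final 'dp[s]' subscript, where Python's negative-index rule matters,
-- is done with PySem.List.pyGetD on the list instead.
def pvGet (a : Array Int) (j : Int) : Int := a.getD j.toNat 0
def pvSet (a : Array Int) (j v : Int) : Array Int := a.setIfInBounds j.toNat v

-- inner 'while ni <= e: mem[ni] += 2; ni += i' of A.
-- The '1 ≤ i' conjunct is a totality guard only: Python's loop diverges for i ≤ 0,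
-- and the loop is only reached with i ≥ 1 (i starts at 1 and is incremented).
def sieveAInner (e i ni : Int) (mem : Array Int) : Array Int :=
  if h : ni ≤ e ∧ 1 ≤ i then
    sieveAInner e i (ni + i) (pvSet mem ni (pvGet mem ni + 2))
  else mem
termination_by (e + 1 - ni).toNat
decreasing_by omega

-- outer 'while True: ni = i*i; if ni > e: break; mem[ni] -= 1; <inner>; i += 1'.
-- '1 ≤ i' is again only a totality guard (the loop starts at i = 1).
def sieveAOuter (e i : Int) (mem : Array Int) : Array Int :=
  if h : i * i ≤ e ∧ 1 ≤ i then
    sieveAOuter e (i + 1)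
      (sieveAInner e i (i * i) (pvSet mem (i * i) (pvGet mem (i * i) - 1)))
  else mem
termination_by (e + 1 - i).toNat
decreasing_by
  have hii : i ≤ i * i := le_mul_of_one_le_left (by omega) h.2
  omega

-- dp phase + query of A: 'dp = [0]*(e+1); mx = mem[e]; dp[e] = e;
-- for i in range(e-1,-1,-1): ...; return [dp[s] for s in starts]'
def queryA (e : Int) (mem : Array Int) (starts : List Int) : List Int :=
  let dp0 := pvSet (Array.replicate (e + 1).toNat 0) e e
  let st := (PySem.List.pyRange (e - 1) (-1) (-1)).foldl
    (fun s i =>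
      if s.1 ≤ pvGet mem i then
        (pvGet mem i, pvSet s.2 i i)
      else
        (s.1, pvSet s.2 i (pvGet s.2 (i + 1))))
    (pvGet mem e, dp0)
  starts.map (fun s => PySem.List.pyGetD st.2.toList s 0)

def solution (e : Int) (starts : List Int) : List Int :=
  queryA e (sieveAOuter e 1 (Array.replicate (e + 1).toNat 0)) starts

-- ===== PORT B =====
-- B's sieve: 'for i in range(1, e+1): for j in range(i, e+1, i): mem[j] += 1'
def sieveB (e : Int) (mem : Array Int) : Array Int :=
  (PySem.List.pyRange 1 (e + 1) 1).foldl
    (fun m i =>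
      (PySem.List.pyRange i (e + 1) i).foldl
        (fun m2 j => pvSet m2 j (pvGet m2 j + 1)) m)
    mem

-- B's dp phase: 'dp = [e]; for i in range(e-1,-1,-1):
--   dp.append(i if mem[i] >= mem[dp[-1]] else dp[-1]); dp.reverse()'
-- dp is a plain Lean list; 'dp[-1]' is its last element (dp is never empty,
-- so getLastD's default is never used); then '[dp[s] for s in starts]'.
def queryB (e : Int) (mem : Array Int) (starts : List Int) : List Int :=
  let dp := (PySem.List.pyRange (e - 1) (-1) (-1)).foldl
    (fun dp i =>
      dp ++ [if pvGet mem (dp.getLastD 0) ≤ pvGet mem i then i else dp.getLastD 0])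
    [e]
  let dpr := dp.reverse
  starts.map (fun s => PySem.List.pyGetD dpr s 0)

def solution_alt (e : Int) (starts : List Int) : List Int :=
  queryB e (sieveB e (Array.replicate (e + 1).toNat 0)) starts

-- ===== PRECONDITION & SPEC =====
-- Pre_ excludes exactly the inputs on which Python A raises IndexError:
-- e < 0 (mem[e] on an empty list) and queries s outside [-(e+1), e] (dp[s]).
def Pre_solution (e : Int) (starts : List Int) : Prop :=
  0 ≤ e ∧ ∀ s ∈ starts, -(e + 1) ≤ s ∧ s ≤ e
instance (e : Int) (starts : List Int) : Decidable (Pre_solution e starts) := by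
  unfold Pre_solution; infer_instance

def pvWitness_solution : Int × List Int := (6, [0, 3, -1])

def Spec_solution (e : Int) (starts : List Int) (out : List Int) : Prop := out = solution_alt e starts
instance (e : Int) (starts : List Int) (out : List Int) : Decidable (Spec_solution e starts out) := by unfold Spec_solution; infer_instance

-- ===== CLAIM (what is proved, stated in full; the proofs are below) =====
def Claim_equal_solution : Prop := ∀ (e : Int) (starts : List Int), Dom_solution e starts → Pre_solution e starts → Spec_solution e starts (solution e starts)

-- ===== LEMMAS AND PROOFS =====

-- value/size of one 'mem[j] += δ' update
lemma size_bump (m : Array Int) (j v : Int) :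
    (pvSet m j v).size = m.size := Array.size_setIfInBounds

lemma get_bump (m : Array Int) (j δ : Int) (hj0 : 0 ≤ j) (hj : j < (m.size : Int))
    (k : Nat) :
    (pvSet m j (pvGet m j + δ)).getD k 0 = m.getD k 0 + if (k : Int) = j then δ else 0 := by
  unfold pvSet pvGet
  by_cases hk : k < m.size
  · have h1 : (m.setIfInBounds j.toNat (m.getD j.toNat 0 + δ)).getD k 0
        = (m.setIfInBounds j.toNat (m.getD j.toNat 0 + δ))[k]'(by
            simpa [Array.size_setIfInBounds] using hk) := by
      simp [Array.getD, Array.size_setIfInBounds, hk]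
    rw [h1, Array.getElem_setIfInBounds hk]
    by_cases hkj : (k : Int) = j
    · have hjk : j.toNat = k := by omega
      simp [hjk, hkj, Array.getD, hk]
    · have hjk : ¬ j.toNat = k := by omega
      simp [hjk, hkj, Array.getD, hk]
  · have hkj : ¬ (k : Int) = j := by omega
    simp [Array.getD, Array.size_setIfInBounds, hk, hkj]

lemma size_sieveAInner (e i ni : Int) (mem : Array Int) :
    (sieveAInner e i ni mem).size = mem.size := by
  fun_induction sieveAInner with
  | case1 ni mem h ih => rw [ih, size_bump]
  | case2 => rfl

lemma size_sieveAOuter (e i : Int) (mem : Array Int) :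
    (sieveAOuter e i mem).size = mem.size := by
  fun_induction sieveAOuter with
  | case1 i mem h ih => rw [ih, size_sieveAInner, size_bump]
  | case2 => rfl

lemma get_sieveAInner (e i ni : Int) (mem : Array Int)
    (hlen : (mem.size : Int) = e + 1) (hi : 1 ≤ i) (hni : 1 ≤ ni)
    (k : Nat) (hk : k < mem.size) :
    (sieveAInner e i ni mem).getD k 0 =
      mem.getD k 0 + (if ni ≤ (k : Int) ∧ i ∣ ((k : Int) - ni) then 2 else 0) := by
  fun_induction sieveAInner e i ni mem with
  | case1 ni mem h ih =>
    have hk' : (k : Int) < e + 1 := by omega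
    have hnilen : ni < (mem.size : Int) := by omega
    rw [ih (by rw [size_bump]; exact hlen) (by omega) (by simpa [size_bump] using hk)]
    rw [get_bump mem ni 2 (by omega) hnilen k]
    by_cases hkni : (k : Int) = ni
    · have h1 : ¬ (ni + i ≤ (k : Int) ∧ i ∣ ((k : Int) - (ni + i))) := fun hc => by omega
      have h2 : ni ≤ (k : Int) ∧ i ∣ ((k : Int) - ni) := ⟨by omega, by rw [hkni]; simp⟩
      rw [if_pos hkni, if_neg h1, if_pos h2]
      ring
    · have hdvd : i ∣ ((k : Int) - (ni + i)) ↔ i ∣ ((k : Int) - ni) := by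
        constructor
        · rintro ⟨c, hc⟩; exact ⟨c + 1, by linarith⟩
        · rintro ⟨c, hc⟩; exact ⟨c - 1, by linarith⟩
      by_cases hcond : ni ≤ (k : Int) ∧ i ∣ ((k : Int) - ni)
      · have hge : ni + i ≤ (k : Int) := by
          have : i ≤ (k : Int) - ni := Int.le_of_dvd (by omega) hcond.2
          omega
        have hc2 : ni + i ≤ (k : Int) ∧ i ∣ ((k : Int) - (ni + i)) := ⟨hge, hdvd.mpr hcond.2⟩
        simp [hc2, hcond, hkni]
      · have hc2 : ¬ (ni + i ≤ (k : Int) ∧ i ∣ ((k : Int) - (ni + i))) := by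
          intro hc; exact hcond ⟨by omega, hdvd.mp hc.2⟩
        simp [hc2, hcond, hkni]
  | case2 ni mem h =>
    have hni' : e < ni := by omega
    have hk' : (k : Int) < e + 1 := by omega
    have hc : ¬ (ni ≤ (k : Int) ∧ i ∣ ((k : Int) - ni)) := fun hc => by omega
    simp [hc]

-- closed form for A's outer loop: contributions of the remaining iterations i, i+1, …
lemma get_sieveAOuter (e i : Int) (mem : Array Int)
    (hlen : (mem.size : Int) = e + 1) (hi : 1 ≤ i)
    (k : Nat) (hk : k < mem.size) :
    (sieveAOuter e i mem).getD k 0 =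
      mem.getD k 0
        + 2 * (((Finset.Ico i.toNat (e + 1).toNat).filter (fun m => m * m ≤ k ∧ m ∣ k)).card : Int)
        - (((Finset.Ico i.toNat (e + 1).toNat).filter (fun m => m * m = k)).card : Int) := by
  fun_induction sieveAOuter e i mem with
  | case1 i mem h ih =>
    have hii : i ≤ i * i := le_mul_of_one_le_left (by omega) h.2
    have hlen1 : ((pvSet mem (i * i) (pvGet mem (i * i) - 1)).size : Int) = e + 1 := by
      rw [size_bump]; exact hlen
    have hlen2 : ((sieveAInner e i (i * i)
        (pvSet mem (i * i) (pvGet mem (i * i) - 1))).size : Int) = e + 1 := by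
      rw [size_sieveAInner, size_bump]; exact hlen
    have hk' : (k : Int) < e + 1 := by omega
    rw [ih hlen2 (by omega) (by omega)]
    rw [get_sieveAInner e i (i * i) _ hlen1 h.2 (by nlinarith [h.2]) k (by omega)]
    have hbump : (pvSet mem (i * i) (pvGet mem (i * i) - 1)).getD k 0 =
        mem.getD k 0 + if (k : Int) = i * i then (-1 : Int) else 0 := by
      have := get_bump mem (i * i) (-1) (by nlinarith [h.2]) (by omega) k
      simpa [sub_eq_add_neg] using this
    rw [hbump]
    -- Finset bookkeeping
    have hitn : ((i.toNat : Int)) = i := Int.toNat_of_nonneg (by omega)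
    have hcast : ((i.toNat * i.toNat : Nat) : Int) = i * i := by push_cast [hitn]; ring
    have hiX : i.toNat < (e + 1).toNat := by
      have : i ≤ e := le_trans hii h.1
      omega
    have hi1 : (i + 1).toNat = i.toNat + 1 := by omega
    have hsq : ((k : Int) = i * i) ↔ (k = i.toNat * i.toNat) := by
      rw [← hcast]; exact Nat.cast_inj
    have hdvd1 : (i ∣ ((k : Int) - i * i)) ↔ (i ∣ (k : Int)) := by
      constructor
      · rintro ⟨c, hc⟩; exact ⟨c + i, by linarith⟩
      · rintro ⟨c, hc⟩; exact ⟨c - i, by linarith⟩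
    have hcond : (i * i ≤ (k : Int) ∧ i ∣ ((k : Int) - i * i))
        ↔ (i.toNat * i.toNat ≤ k ∧ i.toNat ∣ k) := by
      rw [hdvd1, ← hcast, ← hitn]
      constructor
      · rintro ⟨h1, h2⟩; exact ⟨by exact_mod_cast h1, by exact_mod_cast h2⟩
      · rintro ⟨h1, h2⟩; exact ⟨by exact_mod_cast h1, by exact_mod_cast h2⟩
    have hsplit : Finset.Ico i.toNat (e + 1).toNat
        = insert i.toNat (Finset.Ico (i.toNat + 1) (e + 1).toNat) := by
      ext m; simp only [Finset.mem_Ico, Finset.mem_insert]; omega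
    have hnotmem : i.toNat ∉ Finset.Ico (i.toNat + 1) (e + 1).toNat := by
      simp [Finset.mem_Ico]
    have hcardS : (((Finset.Ico i.toNat (e + 1).toNat).filter (fun m => m * m ≤ k ∧ m ∣ k)).card : Int)
        = (((Finset.Ico (i.toNat + 1) (e + 1).toNat).filter (fun m => m * m ≤ k ∧ m ∣ k)).card : Int)
          + (if i.toNat * i.toNat ≤ k ∧ i.toNat ∣ k then 1 else 0) := by
      rw [hsplit, Finset.filter_insert]
      split_ifs with hc
      · rw [Finset.card_insert_of_notMem (fun hm => hnotmem (Finset.mem_of_mem_filter _ hm))]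
        push_cast; ring
      · ring
    have hcardT : (((Finset.Ico i.toNat (e + 1).toNat).filter (fun m => m * m = k)).card : Int)
        = (((Finset.Ico (i.toNat + 1) (e + 1).toNat).filter (fun m => m * m = k)).card : Int)
          + (if k = i.toNat * i.toNat then 1 else 0) := by
      rw [hsplit, Finset.filter_insert]
      by_cases hc : i.toNat * i.toNat = k
      · rw [if_pos hc, if_pos (by omega : k = i.toNat * i.toNat),
          Finset.card_insert_of_notMem (fun hm => hnotmem (Finset.mem_of_mem_filter _ hm))]
        push_cast; ring
      · rw [if_neg hc, if_neg (by omega : ¬ k = i.toNat * i.toNat)]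
        ring
    rw [hi1, hcardS, hcardT]
    rw [if_congr hsq rfl rfl, if_congr hcond rfl rfl]
    split_ifs <;> ring
  | case2 i mem h =>
    have hie : e < i * i := by
      rcases not_and_or.mp h with h1 | h2
      · omega
      · omega
    have hke : k ≤ e.toNat := by omega
    have hii : e.toNat < i.toNat * i.toNat := by
      have h1 : ((i.toNat : Int)) = i := Int.toNat_of_nonneg (by omega)
      have : e < ((i.toNat * i.toNat : Nat) : Int) := by push_cast [h1]; exact hie
      omega
    have hS : (Finset.Ico i.toNat (e + 1).toNat).filter (fun m => m * m ≤ k ∧ m ∣ k) = ∅ := by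
      apply Finset.filter_eq_empty_iff.mpr
      intro m hm
      simp only [Finset.mem_Ico] at hm
      have : i.toNat * i.toNat ≤ m * m := Nat.mul_le_mul hm.1 hm.1
      intro hc; omega
    have hT : (Finset.Ico i.toNat (e + 1).toNat).filter (fun m => m * m = k) = ∅ := by
      apply Finset.filter_eq_empty_iff.mpr
      intro m hm
      simp only [Finset.mem_Ico] at hm
      have : i.toNat * i.toNat ≤ m * m := Nat.mul_le_mul hm.1 hm.1
      intro hc; omega
    simp [hS, hT]

-- value/size of B's inner fold over an arbitrary index list
lemma size_foldB (L : List Int) (mem : Array Int) :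
    (L.foldl (fun m2 j => pvSet m2 j (pvGet m2 j + 1)) mem).size = mem.size := by
  induction L generalizing mem with
  | nil => rfl
  | cons x L ih => simp only [List.foldl_cons]; rw [ih, size_bump]

lemma get_foldB (L : List Int) (mem : Array Int)
    (hL : ∀ j ∈ L, 0 ≤ j ∧ j < (mem.size : Int)) (k : Nat) :
    (L.foldl (fun m2 j => pvSet m2 j (pvGet m2 j + 1)) mem).getD k 0 =
      mem.getD k 0 + (L.count (k : Int) : Int) := by
  induction L generalizing mem with
  | nil => simp
  | cons x L ih =>
    have hx := hL x (by simp)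
    simp only [List.foldl_cons]
    rw [ih _ (by intro j hj; simpa [size_bump] using hL j (by simp [hj]))]
    rw [get_bump mem x 1 hx.1 hx.2 k]
    rw [List.count_cons]
    by_cases hkx : (k : Int) = x
    · simp [hkx]; ring
    · have hxk : ¬ x = (k : Int) := fun hxe => hkx hxe.symm
      simp [hkx, hxk]

lemma nodup_pyRange_pos (a b s : Int) (hs : 0 < s) : (PySem.List.pyRange a b s).Nodup := by
  rw [PySem.List.pyRange_of_pos a b hs]
  refine List.Nodup.map ?_ List.nodup_range
  intro x y hxy
  have h1 : s * (x : Int) = s * (y : Int) := by linarith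
  have h2 := mul_left_cancel₀ (by omega : (s : Int) ≠ 0) h1
  exact_mod_cast h2

lemma count_pyRange_pos (a b s : Int) (hs : 0 < s) (x : Int) :
    ((PySem.List.pyRange a b s).count x : Int)
      = if a ≤ x ∧ x < b ∧ s ∣ (x - a) then 1 else 0 := by
  by_cases hmem : x ∈ PySem.List.pyRange a b s
  · have hcond := (PySem.List.mem_pyRange_iff_of_pos hs x).mp hmem
    simp [List.count_eq_one_of_mem (nodup_pyRange_pos a b s hs) hmem, hcond]
  · have hnot : ¬ (a ≤ x ∧ x < b ∧ s ∣ (x - a)) :=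
      fun h => hmem ((PySem.List.mem_pyRange_iff_of_pos hs x).mpr h)
    simp [List.count_eq_zero_of_not_mem hmem, hnot]

-- closed form for B's sieve started at lower bound a
lemma get_sieveB (e : Int) (k : Nat) : ∀ (n : Nat) (a : Int) (mem : Array Int),
    (mem.size : Int) = e + 1 → 1 ≤ a → n = (e + 1 - a).toNat → k < mem.size →
    ((PySem.List.pyRange a (e + 1) 1).foldl
        (fun m i =>
          (PySem.List.pyRange i (e + 1) i).foldl
            (fun m2 j => pvSet m2 j (pvGet m2 j + 1)) m)
        mem).getD k 0 =
      mem.getD k 0 + (((Finset.Ico a.toNat (e + 1).toNat).filter (fun m => m ≤ k ∧ m ∣ k)).card : Int) := by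
  intro n
  induction n with
  | zero =>
    intro a mem hlen ha hn hk
    have hba : e + 1 ≤ a := by omega
    rw [PySem.List.pyRange_one_eq_nil hba]
    have : Finset.Ico a.toNat (e + 1).toNat = ∅ := by
      apply Finset.Ico_eq_empty; omega
    simp [this]
  | succ n ih =>
    intro a mem hlen ha hn hk
    have hab : a < e + 1 := by omega
    rw [PySem.List.pyRange_one_cons hab]
    simp only [List.foldl_cons]
    have hL : ∀ j ∈ PySem.List.pyRange a (e + 1) a, 0 ≤ j ∧ j < (mem.size : Int) := by
      intro j hj
      have := (PySem.List.mem_pyRange_iff_of_pos (by omega) j).mp hj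
      constructor <;> omega
    have hlen1 : (((PySem.List.pyRange a (e + 1) a).foldl
        (fun m2 j => pvSet m2 j (pvGet m2 j + 1)) mem).size : Int) = e + 1 := by
      rw [size_foldB]; exact hlen
    rw [ih (a + 1) _ hlen1 (by omega) (by omega) (by omega)]
    rw [get_foldB _ _ hL k]
    rw [count_pyRange_pos a (e + 1) a (by omega) (k : Int)]
    have hitn : ((a.toNat : Int)) = a := Int.toNat_of_nonneg (by omega)
    have hk' : (k : Int) < e + 1 := by omega
    have hdvd1 : (a ∣ ((k : Int) - a)) ↔ (a ∣ (k : Int)) := by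
      constructor
      · rintro ⟨c, hc⟩; exact ⟨c + 1, by linarith⟩
      · rintro ⟨c, hc⟩; exact ⟨c - 1, by linarith⟩
    have hcond : (a ≤ (k : Int) ∧ (k : Int) < e + 1 ∧ a ∣ ((k : Int) - a))
        ↔ (a.toNat ≤ k ∧ a.toNat ∣ k) := by
      rw [hdvd1, ← hitn]
      constructor
      · rintro ⟨h1, _, h3⟩
        exact ⟨by exact_mod_cast h1, by exact_mod_cast h3⟩
      · rintro ⟨h1, h2⟩
        exact ⟨by exact_mod_cast h1, hk', by exact_mod_cast h2⟩
    have haX : a.toNat < (e + 1).toNat := by omega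
    have ha1 : (a + 1).toNat = a.toNat + 1 := by omega
    have hsplit : Finset.Ico a.toNat (e + 1).toNat
        = insert a.toNat (Finset.Ico (a.toNat + 1) (e + 1).toNat) := by
      ext m; simp only [Finset.mem_Ico, Finset.mem_insert]; omega
    have hnotmem : a.toNat ∉ Finset.Ico (a.toNat + 1) (e + 1).toNat := by
      simp [Finset.mem_Ico]
    rw [ha1, hsplit, Finset.filter_insert]
    by_cases hc1 : a.toNat ≤ k ∧ a.toNat ∣ k
    · rw [if_pos hc1, if_pos (hcond.mpr hc1)]
      rw [Finset.card_insert_of_notMem (fun hm => hnotmem (Finset.mem_of_mem_filter _ hm))]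
      push_cast; ring
    · rw [if_neg hc1, if_neg (fun h => hc1 (hcond.mp h))]
      ring

lemma divisor_identity (k : Nat) :
    ((Finset.Icc 1 k).filter (fun m => m ∣ k)).card
      + ((Finset.Icc 1 k).filter (fun m => m * m = k)).card
      = 2 * ((Finset.Icc 1 k).filter (fun m => m * m ≤ k ∧ m ∣ k)).card := by
  rcases Nat.eq_zero_or_pos k with hk0 | hk0
  · subst hk0
    rw [Finset.Icc_eq_empty (by omega)]
    simp
  have hkne : k ≠ 0 := by omega
  have hSL : ((Finset.Icc 1 k).filter (fun m => m * m ≤ k ∧ m ∣ k)).card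
      = ((Finset.Icc 1 k).filter (fun m => k ≤ m * m ∧ m ∣ k)).card := by
    apply Finset.card_bij' (i := fun m _ => k / m) (j := fun m _ => k / m)
    · intro a ha
      simp only [Finset.mem_filter, Finset.mem_Icc] at ha
      obtain ⟨⟨ha1, hak⟩, haa, hadvd⟩ := ha
      obtain ⟨c, hc⟩ := hadvd
      have hc' : k / a = c := by rw [hc]; exact Nat.mul_div_cancel_left c (by omega)
      have hac : a ≤ c := Nat.le_of_mul_le_mul_left (by rw [← hc]; exact haa) (by omega)
      simp only [Finset.mem_filter, Finset.mem_Icc]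
      refine ⟨⟨?_, Nat.div_le_self k a⟩, ?_, Nat.div_dvd_of_dvd ⟨c, hc⟩⟩
      · exact (Nat.one_le_div_iff (by omega)).mpr hak
      · rw [hc']; calc k = a * c := hc
          _ ≤ c * c := by exact Nat.mul_le_mul_right c hac
    · intro b hb
      simp only [Finset.mem_filter, Finset.mem_Icc] at hb
      obtain ⟨⟨hb1, hbk⟩, hbb, hbdvd⟩ := hb
      obtain ⟨c, hc⟩ := hbdvd
      have hc' : k / b = c := by rw [hc]; exact Nat.mul_div_cancel_left c (by omega)
      have hbb' : b * c ≤ b * b := by rw [← hc]; exact hbb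
      have hcb : c ≤ b := Nat.le_of_mul_le_mul_left hbb' (by omega)
      simp only [Finset.mem_filter, Finset.mem_Icc]
      refine ⟨⟨?_, Nat.div_le_self k b⟩, ?_, Nat.div_dvd_of_dvd ⟨c, hc⟩⟩
      · exact (Nat.one_le_div_iff (by omega)).mpr hbk
      · rw [hc']; calc c * c ≤ b * c := Nat.mul_le_mul_right c hcb
          _ = k := by rw [hc, Nat.mul_comm]
    · intro a ha
      simp only [Finset.mem_filter, Finset.mem_Icc] at ha
      exact Nat.div_div_self ha.2.2 hkne
    · intro b hb
      simp only [Finset.mem_filter, Finset.mem_Icc] at hb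
      exact Nat.div_div_self hb.2.2 hkne
  have hunion : ((Finset.Icc 1 k).filter (fun m => m * m ≤ k ∧ m ∣ k))
      ∪ ((Finset.Icc 1 k).filter (fun m => k ≤ m * m ∧ m ∣ k))
      = (Finset.Icc 1 k).filter (fun m => m ∣ k) := by
    ext m
    simp only [Finset.mem_union, Finset.mem_filter, Finset.mem_Icc]
    rcases le_total (m * m) k with h | h <;> tauto
  have hinter : ((Finset.Icc 1 k).filter (fun m => m * m ≤ k ∧ m ∣ k))
      ∩ ((Finset.Icc 1 k).filter (fun m => k ≤ m * m ∧ m ∣ k))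
      = (Finset.Icc 1 k).filter (fun m => m * m = k) := by
    ext m
    simp only [Finset.mem_inter, Finset.mem_filter, Finset.mem_Icc]
    constructor
    · rintro ⟨⟨hm, h1, h2⟩, _, h3, _⟩
      exact ⟨hm, by omega⟩
    · rintro ⟨hm, h⟩
      exact ⟨⟨hm, by omega, ⟨m, h.symm⟩⟩, hm, by omega, ⟨m, h.symm⟩⟩
  have := Finset.card_union_add_card_inter
    ((Finset.Icc 1 k).filter (fun m => m * m ≤ k ∧ m ∣ k))
    ((Finset.Icc 1 k).filter (fun m => k ≤ m * m ∧ m ∣ k))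
  rw [hunion, hinter, ← hSL] at this
  omega

lemma size_sieveB (e : Int) (mem : Array Int) :
    (sieveB e mem).size = mem.size := by
  unfold sieveB
  generalize PySem.List.pyRange 1 (e + 1) 1 = L
  induction L generalizing mem with
  | nil => rfl
  | cons x L ih => simp only [List.foldl_cons]; rw [ih, size_foldB]

lemma memA_eq_memB (e : Int) (he : 0 ≤ e) :
    sieveAOuter e 1 (Array.replicate (e + 1).toNat 0)
      = sieveB e (Array.replicate (e + 1).toNat 0) := by
  have hsz : ((Array.replicate (e + 1).toNat (0 : Int)).size : Int) = e + 1 := by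
    simp; omega
  apply Array.ext
  · rw [size_sieveAOuter, size_sieveB]
  · intro k hk1 hk2
    have hk : k < (Array.replicate (e + 1).toNat (0 : Int)).size := by
      rw [size_sieveAOuter] at hk1; exact hk1
    have hgd1 : (sieveAOuter e 1 (Array.replicate (e + 1).toNat 0))[k] =
        (sieveAOuter e 1 (Array.replicate (e + 1).toNat 0)).getD k 0 := by
      simp [Array.getD, hk1]
    have hgd2 : (sieveB e (Array.replicate (e + 1).toNat 0))[k] =
        (sieveB e (Array.replicate (e + 1).toNat 0)).getD k 0 := by
      simp [Array.getD, hk2]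
    rw [hgd1, hgd2]
    rw [get_sieveAOuter e 1 _ hsz (by omega) k hk]
    unfold sieveB
    rw [get_sieveB e k (e + 1 - 1).toNat 1 _ hsz (by omega) rfl hk]
    have hone : (1 : Int).toNat = 1 := rfl
    rw [hone]
    have hkX : k < (e + 1).toNat := by simpa using hk
    have e1 : (Finset.Ico 1 (e + 1).toNat).filter (fun m => m ≤ k ∧ m ∣ k)
        = (Finset.Icc 1 k).filter (fun m => m ∣ k) := by
      ext m
      simp only [Finset.mem_filter, Finset.mem_Ico, Finset.mem_Icc]
      constructor
      · rintro ⟨⟨h1, _⟩, h2, h3⟩; exact ⟨⟨h1, h2⟩, h3⟩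
      · rintro ⟨⟨h1, h2⟩, h3⟩; exact ⟨⟨h1, by omega⟩, h2, h3⟩
    have e2 : (Finset.Ico 1 (e + 1).toNat).filter (fun m => m * m ≤ k ∧ m ∣ k)
        = (Finset.Icc 1 k).filter (fun m => m * m ≤ k ∧ m ∣ k) := by
      ext m
      simp only [Finset.mem_filter, Finset.mem_Ico, Finset.mem_Icc]
      constructor
      · rintro ⟨⟨h1, _⟩, h2, h3⟩
        have hmk : m ≤ m * m := Nat.le_mul_of_pos_left m (by omega)
        exact ⟨⟨h1, by omega⟩, h2, h3⟩
      · rintro ⟨⟨h1, h2⟩, h3, h4⟩; exact ⟨⟨h1, by omega⟩, h3, h4⟩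
    have e3 : (Finset.Ico 1 (e + 1).toNat).filter (fun m => m * m = k)
        = (Finset.Icc 1 k).filter (fun m => m * m = k) := by
      ext m
      simp only [Finset.mem_filter, Finset.mem_Ico, Finset.mem_Icc]
      constructor
      · rintro ⟨⟨h1, _⟩, h2⟩
        have hmk : m ≤ m * m := Nat.le_mul_of_pos_left m (by omega)
        exact ⟨⟨h1, by omega⟩, h2⟩
      · rintro ⟨⟨h1, h2⟩, h3⟩
        have hmk : m ≤ m * m := Nat.le_mul_of_pos_left m (by omega)
        exact ⟨⟨h1, by omega⟩, h3⟩
    rw [e1, e2, e3]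
    have hid := divisor_identity k
    omega

-- coupling of A's (mx, dp-array) fold with B's grow-at-the-end list fold:
-- after processing the countdown t-1, …, 0, A's dp array (as a list) equals
-- the reverse of B's accumulated list.
lemma dp_coupling (e : Int) (mem : Array Int) :
    ∀ (n : Nat) (t : Int) (acc : List Int) (arr : Array Int) (mx : Int),
    0 ≤ t → t ≤ e → n = t.toNat →
    arr.toList = List.replicate t.toNat 0 ++ acc.reverse →
    mx = pvGet mem (acc.getLastD 0) →
    acc ≠ [] →
    ((PySem.List.pyRange (t - 1) (-1) (-1)).foldl
        (fun s i =>
          if s.1 ≤ pvGet mem i then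
            (pvGet mem i, pvSet s.2 i i)
          else
            (s.1, pvSet s.2 i (pvGet s.2 (i + 1))))
        (mx, arr)).2.toList
      = ((PySem.List.pyRange (t - 1) (-1) (-1)).foldl
          (fun dp i =>
            dp ++ [if pvGet mem (dp.getLastD 0) ≤ pvGet mem i then i else dp.getLastD 0])
          acc).reverse := by
  intro n
  induction n with
  | zero =>
    intro t acc arr mx ht0 hte hn harr hmx hne
    have ht : t = 0 := by omega
    subst ht
    rw [PySem.List.pyRange_neg_one_eq_nil (by omega)]
    simpa using harr
  | succ n ih =>
    intro t acc arr mx ht0 hte hn harr hmx hne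
    have ht1 : (0 : Int) ≤ t - 1 := by omega
    rw [PySem.List.pyRange_neg_one_cons (by omega : (-1 : Int) < t - 1)]
    simp only [List.foldl_cons]
    -- the value A reads at arr[t] is acc's last element
    have hlenarr : arr.toList.length = t.toNat + acc.length := by
      rw [harr]; simp
    have hget_t : pvGet arr t = acc.getLastD 0 := by
      unfold pvGet
      have h1 : arr.getD t.toNat 0 = arr.toList.getD t.toNat 0 := by
        rcases arr with ⟨l⟩; simp [Array.getD, List.getD]
        by_cases h : t.toNat < l.length <;> simp [h]
      rw [h1, harr]
      rw [List.getD_eq_getElem?_getD, List.getElem?_append_right (by simp)]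
      simp only [List.length_replicate, Nat.sub_self]
      rcases List.eq_nil_or_concat acc with h | ⟨l, a, rfl⟩
      · exact absurd h hne
      · simp
    -- one step of both folds produces coupled states again
    set v : Int := if pvGet mem (acc.getLastD 0) ≤ pvGet mem (t - 1) then t - 1 else acc.getLastD 0 with hv
    have hstepA :
        (if mx ≤ pvGet mem (t - 1) then
            (pvGet mem (t - 1), pvSet arr (t - 1) (t - 1))
          else (mx, pvSet arr (t - 1) (pvGet arr (t - 1 + 1))))
        = (pvGet mem v, pvSet arr (t - 1) v) := by
      have ht1' : t - 1 + 1 = t := by ring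
      rw [ht1', hget_t, hmx, hv]
      split_ifs <;> rfl
    rw [hstepA]
    -- new array toList
    have harr' : (pvSet arr (t - 1) v).toList
        = List.replicate (t - 1).toNat 0 ++ (acc ++ [v]).reverse := by
      unfold pvSet
      rw [Array.toList_setIfInBounds, harr]
      have htn : t.toNat = (t - 1).toNat + 1 := by omega
      rw [htn, List.replicate_succ' (n := (t - 1).toNat)]
      rw [List.append_assoc]
      rw [List.set_append_right _ _ (by simp)]
      simp
    have hlast' : (acc ++ [v]).getLastD 0 = v := by simp
    rw [ih (t - 1) (acc ++ [v]) (pvSet arr (t - 1) v) (pvGet mem v)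
      (by omega) (by omega) (by omega) harr' (by rw [hlast']) (by simp)]

lemma query_eq (e : Int) (mem : Array Int) (starts : List Int) (he : 0 ≤ e) :
    queryA e mem starts = queryB e mem starts := by
  unfold queryA queryB
  dsimp only
  have h0 : (pvSet (Array.replicate (e + 1).toNat 0) e e).toList
      = List.replicate e.toNat 0 ++ ([e] : List Int).reverse := by
    unfold pvSet
    rw [Array.toList_setIfInBounds, Array.toList_replicate]
    have h1 : (e + 1).toNat = e.toNat + 1 := by omega
    rw [h1, List.replicate_succ' (n := e.toNat)]
    rw [List.set_append_right _ _ (by simp)]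
    simp
  rw [dp_coupling e mem e.toNat e [e] _ (pvGet mem e) he le_rfl rfl h0 (by simp) (by simp)]

-- ===== VERDICT (by name: the statement is the Claim_ definition above) =====
theorem solution_spec : Claim_equal_solution := by
  intro e starts _hdom hpre
  unfold Spec_solution
  simp only [solution, solution_alt]
  rw [memA_eq_memB e hpre.1, query_eq _ _ _ hpre.1]
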